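-- pv_equiv track=rewrite | github.com/Anthony-MPO-dev/PAA | Trabalho NP-Completo/src/trata_A_para_B.py | reduce_3CNF_to_Independent_Set
-- ===== SOURCE A (Python) =====
-- def reduce_3CNF_to_Independent_Set(clauses):
--     """
--     Reduz uma instância do problema 3CNF-SAT para uma instância do problema Independent Set.
--
--     Argumentos:
--     clauses -- Lista de cláusulas na forma de listas de literais.
--
--     Retorna:
--     Um grafo representado como um dicionário de adjacência, que é uma instância do problema Independent Set.
--
--
--     Funcionamento:
--
--         Inicialização do Grafo:
--
--         Exemplo : [['A', 'B', '¬C'], ['¬A', '¬B', 'C'], ['A', '¬B', 'C']]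
--
--         Inicializamos um dicionário vazio para representar o grafo.
--         Iteração sobre as Cláusulas:
--
--         Iteramos sobre cada cláusula na lista de cláusulas.
--         Iteração sobre os Literais:
--
--         Para cada literal em cada cláusula, verificamos se ele já está presente como uma chave no grafo.
--         Para a primeira cláusula ['A', 'B', '¬C']:
--
--         'A', 'B' e '¬C' não estão presentes no grafo, então adicionamos esses literais como chaves e listas vazias como seus valores.
--         Para a segunda cláusula ['¬A', '¬B', 'C']:
--
--         '¬A', '¬B' e 'C' não estão presentes no grafo, então adicionamos esses literais como chaves e listas vazias como seus valores.
--         Para a terceira cláusula ['A', '¬B', 'C']: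
--
--         'A', '¬B' e 'C' já estão presentes no grafo, então não fazemos nada.
--         Conexões entre Vértices:
--
--         Para cada par de literais diferentes na mesma cláusula, verificamos se há uma conexão entre os vértices correspondentes no grafo.
--         Para a primeira cláusula ['A', 'B', '¬C']:
--
--         Adicionamos conexões entre 'A' e 'B', 'A' e '¬C', e 'B' e '¬C' no grafo.
--         Para a segunda cláusula ['¬A', '¬B', 'C']:
--
--         Adicionamos conexões entre '¬A' e '¬B', '¬A' e 'C', e '¬B' e 'C' no grafo.
--         Para a terceira cláusula ['A', '¬B', 'C']:
--
--         Adicionamos conexões entre 'A' e '¬B', 'A' e 'C', e '¬B' e 'C' no grafo.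
--         Resultado do Grafo:
--
--         O grafo resultante é {'A': ['B', '¬C', '¬B', 'C'], 'B': ['A', '¬C', '¬A', 'C'], '¬C': ['A', 'B', '¬A', '¬B'], '¬A': ['¬B', 'C'], '¬B': ['¬A', 'C'], 'C': ['¬A', '¬B', 'A', 'B']}. Cada literal na cláusula se tornou um vértice no grafo, e as conexões entre os literais na cláusula se tornaram arestas no grafo.
--
--
--     """
--     graph = {}
--
--     for clause in clauses:
--         for literal in clause:
--             if literal not in graph:
--                 graph[literal] = []
--
--             for other_literal in clause:
--                 if literal != other_literal:
--                     if other_literal not in graph[literal]: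
--                         graph[literal].append(other_literal)
--
--     return graph
-- ===== SOURCE B (Python) =====
-- def reduce_3CNF_to_Independent_Set(clauses):
--     # Vertex-major construction: first collect the vertices (first-seen order),
--     # then build each vertex's neighbor list by one scan over all clauses.
--     keys = []
--     for clause in clauses:
--         for lit in clause:
--             if lit not in keys:
--                 keys.append(lit)
--     graph = {}
--     for v in keys:
--         nbrs = []
--         for clause in clauses:
--             if v in clause:
--                 for w in clause:
--                     if w != v and w not in nbrs:
--                         nbrs.append(w)
--         graph[v] = nbrs
--     return graph
-- ===== Notes on version B (the rewrite author's own statement) =====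
-- stated objective: alternative
-- what changed: A builds the adjacency dict clause-major by in-place mutation (for each clause, for each literal, rescan the clause appending missing neighbors); B is vertex-major: it first collects the distinct literals in first-seen order, then builds each vertex's neighbor list independently by one deduplicating scan over all clauses containing it, and assembles the dict once at the end.
import Mathlib
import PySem

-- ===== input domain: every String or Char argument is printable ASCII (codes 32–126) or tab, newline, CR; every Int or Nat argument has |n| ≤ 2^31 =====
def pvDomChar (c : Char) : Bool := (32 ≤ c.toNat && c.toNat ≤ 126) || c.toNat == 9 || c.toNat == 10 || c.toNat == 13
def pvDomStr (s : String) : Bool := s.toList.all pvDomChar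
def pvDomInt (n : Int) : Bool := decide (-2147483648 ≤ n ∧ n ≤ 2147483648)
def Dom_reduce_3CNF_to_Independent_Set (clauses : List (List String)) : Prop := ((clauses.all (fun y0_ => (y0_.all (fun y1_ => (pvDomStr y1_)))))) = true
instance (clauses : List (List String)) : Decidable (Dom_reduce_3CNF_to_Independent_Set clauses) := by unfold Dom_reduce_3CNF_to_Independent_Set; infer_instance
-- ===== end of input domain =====

-- B rebuilds the conflict graph vertex-major (distinct literals first, then one deduplicating
-- scan per vertex) instead of A's clause-major in-place dict mutation; objective: alternative.

-- ===== PORT A =====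
-- inner loop body: if literal != other_literal and other_literal not in graph[literal]: graph[literal].append(other_literal)
-- (the append is an in-place update of an existing key: Dict.insert overwrites keeping position)
def pvAddNbr (lit : String) (d : PySem.Dict String (List String)) (other : String) :
    PySem.Dict String (List String) :=
  if lit ≠ other then
    if other ∉ d.getD lit [] then d.insert lit (d.getD lit [] ++ [other]) else d
  else d

-- body of "for literal in clause": ensure the key exists, then scan the clause appending neighbors
def pvStepLit (clause : List String) (d : PySem.Dict String (List String)) (lit : String) :
    PySem.Dict String (List String) :=
  let d1 := if d.contains lit then d else d.insert lit []
  clause.foldl (pvAddNbr lit) d1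

def reduce_3CNF_to_Independent_Set (clauses : List (List String)) : List (String × List String) :=
  (clauses.foldl (fun d clause => clause.foldl (pvStepLit clause) d) PySem.Dict.empty).items

-- ===== PORT B =====
-- if lit not in keys: keys.append(lit)
def pvAddKey (ks : List String) (l : String) : List String :=
  if l ∈ ks then ks else ks ++ [l]

def pvKeysOf (clauses : List (List String)) : List String :=
  clauses.foldl (fun ks c => c.foldl pvAddKey ks) []

-- if w != v and w not in nbrs: nbrs.append(w)
def pvNbrStep (v : String) (ns : List String) (w : String) : List String :=
  if w ≠ v ∧ w ∉ ns then ns ++ [w] else ns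

def pvNbrsOf (clauses : List (List String)) (v : String) : List String :=
  clauses.foldl (fun ns c => if v ∈ c then c.foldl (pvNbrStep v) ns else ns) []

def reduce_3CNF_to_Independent_Set_alt (clauses : List (List String)) : List (String × List String) :=
  ((pvKeysOf clauses).foldl (fun g v => g.insert v (pvNbrsOf clauses v)) PySem.Dict.empty).items

-- ===== PRECONDITION & SPEC =====
def Spec_reduce_3CNF_to_Independent_Set (clauses : List (List String)) (out : List (String × List String)) : Prop := out = reduce_3CNF_to_Independent_Set_alt clauses
instance (clauses : List (List String)) (out : List (String × List String)) : Decidable (Spec_reduce_3CNF_to_Independent_Set clauses out) := by unfold Spec_reduce_3CNF_to_Independent_Set; infer_instance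

-- ===== CLAIM (what is proved, stated in full; the proofs are below) =====
def Claim_equal_reduce_3CNF_to_Independent_Set : Prop := ∀ (clauses : List (List String)), Dom_reduce_3CNF_to_Independent_Set clauses → Spec_reduce_3CNF_to_Independent_Set clauses (reduce_3CNF_to_Independent_Set clauses)

-- ===== LEMMAS AND PROOFS =====

-- A dict whose items pair each key of ks with f applied to it; A's evolving state always has this shape.
def gmap (ks : List String) (f : String → List String) : PySem.Dict String (List String) :=
  PySem.Dict.mk (ks.map fun v => (v, f v))

theorem gmap_items (ks : List String) (f : String → List String) :
    (gmap ks f).items = ks.map fun v => (v, f v) := rfl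

theorem gmap_keys (ks : List String) (f : String → List String) : (gmap ks f).keys = ks := by
  simp [gmap, PySem.Dict.keys_mk, Function.comp_def]

theorem gmap_contains (ks : List String) (f : String → List String) (a : String) :
    (gmap ks f).contains a = decide (a ∈ ks) := by
  rw [PySem.Dict.contains_eq_decide_mem_keys, gmap_keys]

theorem gmap_congr {ks : List String} {f g : String → List String}
    (h : ∀ v ∈ ks, f v = g v) : gmap ks f = gmap ks g := by
  unfold gmap
  exact congrArg PySem.Dict.mk (List.map_congr_left (fun v hv => by rw [h v hv]))

theorem gmap_getD {ks : List String} (f : String → List String) {a : String}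
    (ha : a ∈ ks) (hnd : ks.Nodup) : (gmap ks f).getD a [] = f a := by
  refine PySem.Dict.getD_of_mem_items _ ?_ ?_ []
  · exact List.mem_map.mpr ⟨a, ha, rfl⟩
  · rw [gmap_keys]; exact hnd

theorem dict_eq_of_items {d e : PySem.Dict String (List String)}
    (h : d.items = e.items) : d = e := by
  cases d; cases e; simpa using h

theorem gmap_insert_mem {ks : List String} (f : String → List String) {a : String}
    (ha : a ∈ ks) (x : List String) :
    (gmap ks f).insert a x = gmap ks (fun v => if v = a then x else f v) := by
  have hc : (gmap ks f).contains a = true := by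
    rw [gmap_contains]; exact decide_eq_true ha
  refine dict_eq_of_items ?_
  rw [PySem.Dict.items_insert_of_contains (gmap ks f) x hc, gmap_items, List.map_map,
    gmap_items]
  refine List.map_congr_left (fun v _ => ?_)
  by_cases hv : v = a <;> simp [hv]

theorem gmap_insert_new {ks : List String} (f : String → List String) {a : String}
    (ha : a ∉ ks) (x : List String) :
    (gmap ks f).insert a x = gmap (ks ++ [a]) (fun v => if v = a then x else f v) := by
  have hc : (gmap ks f).contains a = false := by
    rw [gmap_contains]; exact decide_eq_false ha
  refine dict_eq_of_items ?_
  rw [PySem.Dict.items_insert_of_not_contains (gmap ks f) x hc, gmap_items, gmap_items,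
    List.map_append]
  congr 1
  · refine List.map_congr_left (fun v hv => ?_)
    have hva : v ≠ a := fun h' => ha (h' ▸ hv)
    simp [hva]
  · simp

-- ----- facts about the dedup-append loop pvNbrStep -----

theorem mem_foldl_nbrStep (v w : String) (c ns : List String) (h : w ∈ ns) :
    w ∈ c.foldl (pvNbrStep v) ns := by
  induction c generalizing ns with
  | nil => exact h
  | cons x c ih =>
    refine ih _ ?_
    unfold pvNbrStep
    split
    · exact List.mem_append_left _ h
    · exact h

theorem mem_foldl_nbrStep_of_mem {v w : String} {c : List String} (ns : List String)
    (hw : w ∈ c) (hne : w ≠ v) : w ∈ c.foldl (pvNbrStep v) ns := by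
  induction c generalizing ns with
  | nil => cases hw
  | cons x c ih =>
    rcases List.mem_cons.mp hw with h | h
    · subst h
      refine mem_foldl_nbrStep v w c _ ?_
      unfold pvNbrStep
      by_cases hin : w ∈ ns
      · rw [if_neg (fun h => h.2 hin)]; exact hin
      · rw [if_pos ⟨hne, hin⟩]; simp
    · exact ih _ h

theorem foldl_nbrStep_noop (v : String) (c ns : List String)
    (h : ∀ w ∈ c, w ≠ v → w ∈ ns) : c.foldl (pvNbrStep v) ns = ns := by
  induction c with
  | nil => rfl
  | cons x c ih =>
    have hx : pvNbrStep v ns x = ns := by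
      unfold pvNbrStep
      by_cases hxv : x ≠ v
      · simp [h x List.mem_cons_self hxv]
      · simp [hxv]
    rw [List.foldl_cons, hx]
    exact ih (fun w hw => h w (List.mem_cons_of_mem _ hw))

theorem foldl_nbrStep_idem (v : String) (c ns : List String) :
    c.foldl (pvNbrStep v) (c.foldl (pvNbrStep v) ns) = c.foldl (pvNbrStep v) ns :=
  foldl_nbrStep_noop v c _ (fun _ hw hne => mem_foldl_nbrStep_of_mem ns hw hne)

-- ----- facts about pvAddKey -----

theorem mem_pvAddKey_self (ks : List String) (a : String) : a ∈ pvAddKey ks a := by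
  unfold pvAddKey
  split
  · assumption
  · simp

theorem mem_pvAddKey_of_mem {ks : List String} {v : String} (h : v ∈ ks) (a : String) :
    v ∈ pvAddKey ks a := by
  unfold pvAddKey
  split
  · exact h
  · exact List.mem_append_left _ h

theorem nodup_pvAddKey {ks : List String} (h : ks.Nodup) (a : String) :
    (pvAddKey ks a).Nodup := by
  unfold pvAddKey
  split
  · exact h
  · rename_i hna
    rw [List.nodup_append]
    exact ⟨h, List.nodup_singleton a, by intro x hx y hy heq; rw [List.mem_singleton] at hy; exact hna (hy ▸ heq ▸ hx)⟩

theorem nodup_foldl_pvAddKey (c : List String) {ks : List String} (h : ks.Nodup) :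
    (c.foldl pvAddKey ks).Nodup := by
  induction c generalizing ks with
  | nil => exact h
  | cons x c ih => exact ih (nodup_pvAddKey h x)

theorem mem_foldl_pvAddKey_of_mem (c : List String) {ks : List String} {v : String}
    (h : v ∈ ks ∨ v ∈ c) : v ∈ c.foldl pvAddKey ks := by
  induction c generalizing ks with
  | nil => simpa using h.resolve_right (by simp)
  | cons x c ih =>
    rw [List.foldl_cons]
    rcases h with h | h
    · exact ih (Or.inl (mem_pvAddKey_of_mem h x))
    · rcases List.mem_cons.mp h with h | h
      · exact ih (Or.inl (h ▸ mem_pvAddKey_self ks v))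
      · exact ih (Or.inr h)

theorem nodup_keys_fold (cs : List (List String)) {ks : List String} (h : ks.Nodup) :
    (cs.foldl (fun ks c => c.foldl pvAddKey ks) ks).Nodup := by
  induction cs generalizing ks with
  | nil => exact h
  | cons c cs ih => exact ih (nodup_foldl_pvAddKey c h)

-- ----- the per-literal inner loop on a gmap state -----

theorem addNbr_step {ks : List String} (f : String → List String) {a : String} (w : String)
    (ha : a ∈ ks) (hnd : ks.Nodup) :
    pvAddNbr a (gmap ks f) w =
      gmap ks (fun v => if v = a then pvNbrStep a (f a) w else f v) := by
  unfold pvAddNbr pvNbrStep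
  rw [gmap_getD f ha hnd]
  by_cases h1 : a = w
  · subst h1
    rw [if_neg (fun h : a ≠ a => h rfl)]
    refine gmap_congr (fun v _ => ?_)
    by_cases hv : v = a <;> simp [hv]
  · have h1' : w ≠ a := fun h => h1 h.symm
    by_cases h2 : w ∈ f a
    · rw [if_pos h1, if_neg (by simpa using h2)]
      refine gmap_congr (fun v _ => ?_)
      by_cases hv : v = a <;> simp [hv, h2]
    · rw [if_pos h1, if_pos h2, gmap_insert_mem f ha]
      refine gmap_congr (fun v _ => ?_)
      by_cases hv : v = a <;> simp [hv, h1', h2]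

theorem inner_loop (c : List String) {ks : List String} (f : String → List String) {a : String}
    (ha : a ∈ ks) (hnd : ks.Nodup) :
    c.foldl (pvAddNbr a) (gmap ks f) =
      gmap ks (fun v => if v = a then c.foldl (pvNbrStep a) (f a) else f v) := by
  induction c generalizing f with
  | nil =>
    exact (gmap_congr (fun v _ => by by_cases hv : v = a <;> simp [hv])).symm
  | cons w c ih =>
    rw [List.foldl_cons, addNbr_step f w ha hnd, ih]
    refine gmap_congr (fun v _ => ?_)
    by_cases hv : v = a <;> simp [hv]

-- ----- one literal of the clause loop -----

theorem step_lit (c : List String) {ks : List String} (f : String → List String) (a : String)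
    (hnd : ks.Nodup) (hoff : ∀ v, v ∉ ks → f v = []) :
    pvStepLit c (gmap ks f) a =
      gmap (pvAddKey ks a) (fun v => if v = a then c.foldl (pvNbrStep a) (f a) else f v) := by
  unfold pvStepLit
  by_cases ha : a ∈ ks
  · have hc : (gmap ks f).contains a = true := by
      rw [gmap_contains]; exact decide_eq_true ha
    rw [hc, if_pos rfl, inner_loop c f ha hnd]
    unfold pvAddKey
    rw [if_pos ha]
  · have hc : (gmap ks f).contains a = false := by
      rw [gmap_contains]; exact decide_eq_false ha
    rw [hc, if_neg Bool.false_ne_true, gmap_insert_new f ha []]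
    have he : gmap (ks ++ [a]) (fun v => if v = a then [] else f v) = gmap (ks ++ [a]) f := by
      refine gmap_congr (fun v _ => ?_)
      by_cases hv : v = a
      · simp [hv, (hoff a ha).symm]
      · simp [hv]
    have ha' : a ∈ ks ++ [a] := by simp
    have hnd' : (ks ++ [a]).Nodup := by
      rw [List.nodup_append]
      exact ⟨hnd, List.nodup_singleton a, by intro x hx y hy heq; rw [List.mem_singleton] at hy; exact ha (hy ▸ heq ▸ hx)⟩
    rw [he, inner_loop c f ha' hnd']
    unfold pvAddKey
    rw [if_neg ha]

-- ----- the whole clause loop -----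

theorem clause_loop (c : List String) (suf : List String) {ks : List String}
    (f : String → List String) (hnd : ks.Nodup) (hoff : ∀ v, v ∉ ks → f v = []) :
    suf.foldl (pvStepLit c) (gmap ks f) =
      gmap (suf.foldl pvAddKey ks)
        (suf.foldl (fun g a => fun v => if v = a then c.foldl (pvNbrStep a) (g a) else g v) f) := by
  induction suf generalizing ks f with
  | nil => rfl
  | cons a suf ih =>
    have hoff' : ∀ v, v ∉ pvAddKey ks a →
        (fun v => if v = a then c.foldl (pvNbrStep a) (f a) else f v) v = [] := by
      intro v hv
      have hva : v ≠ a := fun h => hv (h ▸ mem_pvAddKey_self ks a)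
      have hvk : v ∉ ks := fun h => hv (mem_pvAddKey_of_mem h a)
      simp [hva, hoff v hvk]
    rw [List.foldl_cons, step_lit c f a hnd hoff,
      ih _ (nodup_pvAddKey hnd a) hoff']
    rfl

-- closed form of the clause loop's pointwise value function (duplicates handled by idempotence)
theorem clause_valfun (c : List String) (suf : List String) (f : String → List String) (v : String) :
    (suf.foldl (fun g a => fun u => if u = a then c.foldl (pvNbrStep a) (g a) else g u) f) v =
      if v ∈ suf then c.foldl (pvNbrStep v) (f v) else f v := by
  induction suf generalizing f with
  | nil => simp
  | cons a suf ih =>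
    rw [List.foldl_cons, ih]
    by_cases hv : v = a
    · subst hv
      by_cases hs : v ∈ suf <;>
        simp [hs, List.mem_cons, foldl_nbrStep_idem]
    · have : (v ∈ a :: suf) = (v ∈ suf) := by simp [List.mem_cons, hv]
      simp [hv, this]

-- ----- the outer clause-by-clause loop -----

theorem outer_loop (cs : List (List String)) {ks : List String} (f : String → List String)
    (hnd : ks.Nodup) (hoff : ∀ v, v ∉ ks → f v = []) :
    cs.foldl (fun d clause => clause.foldl (pvStepLit clause) d) (gmap ks f) =
      gmap (cs.foldl (fun ks c => c.foldl pvAddKey ks) ks)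
        (fun v => cs.foldl (fun ns c => if v ∈ c then c.foldl (pvNbrStep v) ns else ns) (f v)) := by
  induction cs generalizing ks f with
  | nil => exact (gmap_congr (fun v _ => by simp)).symm
  | cons c cs ih =>
    have hfun :
        (c.foldl (fun g a => fun v => if v = a then c.foldl (pvNbrStep a) (g a) else g v) f) =
          (fun v => if v ∈ c then c.foldl (pvNbrStep v) (f v) else f v) :=
      funext (fun v => clause_valfun c c f v)
    have hoff' : ∀ v, v ∉ c.foldl pvAddKey ks →
        (fun v => if v ∈ c then c.foldl (pvNbrStep v) (f v) else f v) v = [] := by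
      intro v hv
      have hvc : v ∉ c := fun h => hv (mem_foldl_pvAddKey_of_mem c (Or.inr h))
      have hvk : v ∉ ks := fun h => hv (mem_foldl_pvAddKey_of_mem c (Or.inl h))
      simp [hvc, hoff v hvk]
    rw [List.foldl_cons, clause_loop c c f hnd hoff, hfun,
      ih _ (nodup_foldl_pvAddKey c hnd) hoff']
    rfl

-- ----- B's assembly loop -----

theorem items_foldl_insert (ks : List String) (F : String → List String)
    (d : PySem.Dict String (List String)) (hnd : ks.Nodup)
    (hfresh : ∀ k ∈ ks, d.contains k = false) :
    (ks.foldl (fun g v => g.insert v (F v)) d).items = d.items ++ ks.map (fun v => (v, F v)) := by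
  induction ks generalizing d with
  | nil => simp
  | cons a ks ih =>
    have hca := hfresh a List.mem_cons_self
    have hfresh' : ∀ k ∈ ks, (d.insert a (F a)).contains k = false := by
      intro k hk
      rw [PySem.Dict.contains_insert]
      have hka : k ≠ a := fun h => (List.nodup_cons.mp hnd).1 (h ▸ hk)
      simp [hka, hfresh k (List.mem_cons_of_mem _ hk)]
    rw [List.foldl_cons, ih _ (List.Nodup.of_cons hnd) hfresh',
      PySem.Dict.items_insert_of_not_contains d (F a) hca]
    simp

-- ===== VERDICT (by name: the statement is the Claim_ definition above) =====
theorem reduce_3CNF_to_Independent_Set_spec : Claim_equal_reduce_3CNF_to_Independent_Set := by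
  intro clauses _
  unfold Spec_reduce_3CNF_to_Independent_Set
  unfold reduce_3CNF_to_Independent_Set reduce_3CNF_to_Independent_Set_alt
  have hA : (clauses.foldl (fun d clause => clause.foldl (pvStepLit clause) d)
        (PySem.Dict.empty : PySem.Dict String (List String))) =
      gmap (pvKeysOf clauses) (fun v => pvNbrsOf clauses v) := by
    have h0 : (PySem.Dict.empty : PySem.Dict String (List String)) =
        gmap [] (fun _ => []) := rfl
    rw [h0]
    exact outer_loop clauses (fun _ => []) List.nodup_nil (fun _ _ => rfl)
  have hB := items_foldl_insert (pvKeysOf clauses) (pvNbrsOf clauses)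
    PySem.Dict.empty (nodup_keys_fold clauses List.nodup_nil)
    (fun k _ => by simp [pysem])
  rw [hA, hB]
  rfl
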